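-- pv_equiv track=rewrite | github.com/MrBrantCode/unitest_baseline | mut_generate/mist_train_cf/cf_9523/solution.py | longest_sublist_with_sum_greater_than_target
-- ===== SOURCE A (Python) =====
-- def longest_sublist_with_sum_greater_than_target(lists, target):
--     longest_sublist = []
--     longest_length = 0
--
--     for sublist in lists:
--         sublist_sum = sum(sublist)
--
--         if sublist_sum > target and len(sublist) > longest_length:
--             longest_sublist = sublist
--             longest_length = len(sublist)
--
--     return longest_sublist
-- ===== SOURCE B (Python) =====
-- def longest_sublist_with_sum_greater_than_target(lists, target):
--     # Stable descending sort by length, then return the first qualifying sublist.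
--     for sublist in sorted(lists, key=len, reverse=True):
--         if sum(sublist) > target:
--             return sublist
--     return []
-- ===== Notes on version B (the rewrite author's own statement) =====
-- stated objective: alternative
-- what changed: Replaces A's one-pass best-so-far accumulator scan with a reorganise-then-scan shape: stably sort the sublists by length in descending order, then return the first one whose sum exceeds target; stability of sorted preserves A's earliest-longest tie-break.
import Mathlib
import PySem

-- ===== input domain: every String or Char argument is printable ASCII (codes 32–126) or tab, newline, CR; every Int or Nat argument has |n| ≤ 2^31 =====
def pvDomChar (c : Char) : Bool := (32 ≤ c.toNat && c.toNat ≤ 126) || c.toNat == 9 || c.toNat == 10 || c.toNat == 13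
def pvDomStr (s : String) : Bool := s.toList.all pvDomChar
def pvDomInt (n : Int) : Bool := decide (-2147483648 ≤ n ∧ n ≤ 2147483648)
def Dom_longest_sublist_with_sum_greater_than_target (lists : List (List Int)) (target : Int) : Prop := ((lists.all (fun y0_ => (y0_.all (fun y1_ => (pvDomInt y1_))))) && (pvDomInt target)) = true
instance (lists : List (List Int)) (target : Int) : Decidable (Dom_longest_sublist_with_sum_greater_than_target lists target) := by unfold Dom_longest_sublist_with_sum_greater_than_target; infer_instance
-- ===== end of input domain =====

-- B replaces A's one-pass best-so-far accumulator with a stable length-descending sort followed by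
-- a scan returning the first sublist whose sum exceeds target; objective: alternative.

-- ===== PORT A =====
def longest_sublist_with_sum_greater_than_target (lists : List (List Int)) (target : Int) : List Int :=
  (lists.foldl (fun acc sublist =>
      let sublist_sum := sublist.sum
      if sublist_sum > target ∧ (sublist.length : Int) > acc.2 then
        (sublist, (sublist.length : Int))
      else acc)
    (([] : List Int), (0 : Int))).1

-- ===== PORT B =====
def longest_sublist_with_sum_greater_than_target_alt (lists : List (List Int)) (target : Int) : List Int :=
  (((PySem.List.sorted lists (fun s => s.length) true).find?
      (fun s => decide (s.sum > target))).getD [])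

-- ===== PRECONDITION & SPEC =====
def Spec_longest_sublist_with_sum_greater_than_target (lists : List (List Int)) (target : Int) (out : List Int) : Prop := out = longest_sublist_with_sum_greater_than_target_alt lists target
instance (lists : List (List Int)) (target : Int) (out : List Int) : Decidable (Spec_longest_sublist_with_sum_greater_than_target lists target out) := by unfold Spec_longest_sublist_with_sum_greater_than_target; infer_instance

-- ===== CLAIM (what is proved, stated in full; the proofs are below) =====
def Claim_equal_longest_sublist_with_sum_greater_than_target : Prop := ∀ (lists : List (List Int)) (target : Int), Dom_longest_sublist_with_sum_greater_than_target lists target → Spec_longest_sublist_with_sum_greater_than_target lists target (longest_sublist_with_sum_greater_than_target lists target)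

-- ===== LEMMAS AND PROOFS =====

-- 'before' predicate of the stable reverse insertion sort keyed by length
def pvBefore (a b : List Int) : Bool := decide (b.length < a.length)

-- A's loop step
def pvStep (target : Int) (acc : List Int × Int) (sublist : List Int) : List Int × Int :=
  if sublist.sum > target ∧ (sublist.length : Int) > acc.2 then (sublist, (sublist.length : Int)) else acc

-- A's loop step fires / does not fire
lemma pvStep_pos (target : Int) (a : List Int × Int) (x : List Int)
    (hq : x.sum > target) (hl : a.2 < (x.length : Int)) :
    pvStep target a x = (x, (x.length : Int)) := by
  unfold pvStep; rw [if_pos]; exact ⟨hq, hl⟩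

lemma pvStep_neg (target : Int) (a : List Int × Int) (x : List Int)
    (hn : ¬ (x.sum > target ∧ (x.length : Int) > a.2)) :
    pvStep target a x = a := by
  unfold pvStep; rw [if_neg hn]

-- find? over a stable insertion into a length-descending list: the earliest-longest rule
lemma pv_find_insertBy (q : List Int → Bool) (x : List Int) (ys : List (List Int))
    (hs : ys.Pairwise (fun a b => b.length ≤ a.length)) :
    (PySem.List.insertBy pvBefore x ys).find? q =
      match ys.find? q with
      | some m => if m.length < x.length ∧ q x then some x else some m
      | none => if q x then some x else none := by
  induction ys with
  | nil => simp [PySem.List.insertBy]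
  | cons y t ih =>
    have hy : ∀ b ∈ t, b.length ≤ y.length := (List.pairwise_cons.mp hs).1
    have ht : t.Pairwise (fun a b => b.length ≤ a.length) := (List.pairwise_cons.mp hs).2
    by_cases hlt : y.length < x.length
    · have hb : pvBefore x y = true := by simp [pvBefore, hlt]
      rw [show PySem.List.insertBy pvBefore x (y :: t) = x :: y :: t by
        simp [PySem.List.insertBy, hb]]
      cases hm : (y :: t).find? q with
      | none =>
        cases hqx : q x <;> simp [hqx, hm]
      | some m =>
        have hmem : m ∈ y :: t := List.mem_of_find?_eq_some hm
        have hml : m.length ≤ y.length := by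
          rcases List.mem_cons.mp hmem with h | h
          · simp [h]
          · exact hy m h
        have hmx : m.length < x.length := lt_of_le_of_lt hml hlt
        cases hqx : q x <;> simp [hqx, hm, hmx]
    · have hb : pvBefore x y = false := by simp [pvBefore]; omega
      rw [show PySem.List.insertBy pvBefore x (y :: t) = y :: PySem.List.insertBy pvBefore x t by
        simp [PySem.List.insertBy, hb]]
      cases hqy : q y with
      | true =>
        have hyx : ¬ (y.length < x.length ∧ q x = true) := fun h => hlt h.1
        simp [hqy, hyx]
      | false =>
        simp [hqy, ih ht]

lemma pv_find_insertBy_none (q : List Int → Bool) (x : List Int) (ys : List (List Int))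
    (hs : ys.Pairwise (fun a b => b.length ≤ a.length)) (h : ys.find? q = none) :
    (PySem.List.insertBy pvBefore x ys).find? q = if q x then some x else none := by
  rw [pv_find_insertBy q x ys hs, h]

lemma pv_find_insertBy_some (q : List Int → Bool) (x : List Int) (ys : List (List Int)) (m : List Int)
    (hs : ys.Pairwise (fun a b => b.length ≤ a.length)) (h : ys.find? q = some m) :
    (PySem.List.insertBy pvBefore x ys).find? q = if m.length < x.length ∧ q x then some x else some m := by
  rw [pv_find_insertBy q x ys hs, h]

-- the sorted prefix built by the foldl-insertBy form is length-descending
lemma pv_sorted_pairwise (xs : List (List Int)) :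
    (xs.foldl (fun acc x => PySem.List.insertBy pvBefore x acc) []).Pairwise
      (fun a b => b.length ≤ a.length) := by
  have h : xs.foldl (fun acc x => PySem.List.insertBy pvBefore x acc) []
      = PySem.List.sorted xs (fun s => s.length) true := by
    rw [PySem.List.sorted_rev_eq_foldl_insertBy]
    rfl
  rw [h]
  exact PySem.List.sorted_pairwise_rev xs (fun s => s.length)

-- main invariant, by induction on the list from the right
lemma pv_invariant (target : Int) (xs : List (List Int)) :
    (let r := (xs.foldl (fun acc x => PySem.List.insertBy pvBefore x acc) []).find?
        (fun s => decide (s.sum > target));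
     let g := xs.foldl (pvStep target) (([] : List Int), (0 : Int));
     (r = none → g = ([], 0)) ∧
     (∀ m, r = some m → (g = (m, (m.length : Int)) ∧ 0 < m.length) ∨ (m = [] ∧ g = ([], 0)))) := by
  induction xs using List.reverseRecOn with
  | nil => simp
  | append_singleton t x ih =>
    simp only [List.foldl_append, List.foldl_cons, List.foldl_nil] at *
    obtain ⟨hn, hs⟩ := ih
    cases hr : (t.foldl (fun acc x => PySem.List.insertBy pvBefore x acc) []).find?
        (fun s => decide (s.sum > target)) with
    | none =>
      rw [pv_find_insertBy_none _ x _ (pv_sorted_pairwise t) hr]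
      have hg := hn hr
      rw [hg]
      cases hqx : decide (x.sum > target) with
      | false =>
        have hq : ¬ x.sum > target := of_decide_eq_false hqx
        constructor
        · intro _; exact pvStep_neg _ _ _ (fun h => hq h.1)
        · intro m hm; simp at hm
      | true =>
        have hq : x.sum > target := of_decide_eq_true hqx
        constructor
        · intro h; simp at h
        · intro m hm
          have e : m = x := by simpa using hm.symm
          rw [e]
          by_cases hx0 : 0 < x.length
          · left
            have hli : ((0 : Int)) < (x.length : Int) := by exact_mod_cast hx0
            exact ⟨pvStep_pos _ _ _ hq hli, hx0⟩
          · right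
            have hx : x = [] := List.eq_nil_of_length_eq_zero (by omega)
            subst hx
            exact ⟨rfl, pvStep_neg _ _ _ (by simp)⟩
    | some m =>
      rw [pv_find_insertBy_some _ x _ m (pv_sorted_pairwise t) hr]
      rcases hs m hr with ⟨hg, hml⟩ | ⟨hme, hg⟩
      · -- g = (m, len m), 0 < len m
        rw [hg]
        by_cases hc : m.length < x.length ∧ decide (x.sum > target) = true
        · obtain ⟨hlen, hqx⟩ := hc
          have hq : x.sum > target := of_decide_eq_true hqx
          have hif : (if m.length < x.length ∧ decide (x.sum > target) = true then some x else some m) = some x := by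
            rw [if_pos ⟨hlen, hqx⟩]
          constructor
          · intro h; rw [hif] at h; simp at h
          · intro m' hm'
            rw [hif] at hm'
            have e : m' = x := (Option.some.inj hm').symm
            rw [e]
            left
            have hli : ((m, (m.length : Int)).2 : Int) < (x.length : Int) := by
              simpa using (by exact_mod_cast hlen : ((m.length : Int)) < (x.length : Int))
            exact ⟨pvStep_pos _ _ _ hq hli, lt_of_le_of_lt (Nat.zero_le _) hlen⟩
        · have hif : (if m.length < x.length ∧ decide (x.sum > target) = true then some x else some m) = some m := by
            rw [if_neg hc]
          constructor
          · intro h; rw [hif] at h; simp at h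
          · intro m' hm'
            rw [hif] at hm'
            have e : m' = m := (Option.some.inj hm').symm
            rw [e]
            left
            refine ⟨pvStep_neg _ _ _ ?_, hml⟩
            rintro ⟨hqs, hli⟩
            refine hc ⟨?_, decide_eq_true hqs⟩
            have hli' : ((m.length : Int)) < (x.length : Int) := by simpa using hli
            exact_mod_cast hli'
      · -- m = [], g = ([], 0)
        subst hme
        rw [hg]
        by_cases hc : ([] : List Int).length < x.length ∧ decide (x.sum > target) = true
        · obtain ⟨hlen, hqx⟩ := hc
          have hq : x.sum > target := of_decide_eq_true hqx
          have hif : (if ([] : List Int).length < x.length ∧ decide (x.sum > target) = true then some x else some ([] : List Int)) = some x := by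
            rw [if_pos ⟨hlen, hqx⟩]
          constructor
          · intro h; rw [hif] at h; simp at h
          · intro m' hm'
            rw [hif] at hm'
            have e : m' = x := (Option.some.inj hm').symm
            rw [e]
            left
            have hx0 : 0 < x.length := by simpa using hlen
            have hli : ((0 : Int)) < (x.length : Int) := by exact_mod_cast hx0
            exact ⟨pvStep_pos _ _ _ hq hli, hx0⟩
        · have hif : (if ([] : List Int).length < x.length ∧ decide (x.sum > target) = true then some x else some ([] : List Int)) = some ([] : List Int) := by
            rw [if_neg hc]
          constructor
          · intro h; rw [hif] at h; simp at h
          · intro m' hm'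
            rw [hif] at hm'
            have e : m' = ([] : List Int) := (Option.some.inj hm').symm
            rw [e]
            right
            refine ⟨rfl, pvStep_neg _ _ _ ?_⟩
            rintro ⟨hqs, hli⟩
            refine hc ⟨?_, decide_eq_true hqs⟩
            have hli' : ((0 : Int)) < (x.length : Int) := by simpa using hli
            exact_mod_cast hli'

-- ===== VERDICT (by name: the statement is the Claim_ definition above) =====
theorem longest_sublist_with_sum_greater_than_target_spec : Claim_equal_longest_sublist_with_sum_greater_than_target := by
  intro lists target _
  show longest_sublist_with_sum_greater_than_target lists target
      = longest_sublist_with_sum_greater_than_target_alt lists target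
  unfold longest_sublist_with_sum_greater_than_target longest_sublist_with_sum_greater_than_target_alt
  rw [PySem.List.sorted_rev_eq_foldl_insertBy]
  have hfold : (List.foldl (fun acc x => PySem.List.insertBy (fun a b => decide ((fun s => s.length) b < (fun s => s.length) a)) x acc) [] lists)
      = lists.foldl (fun acc x => PySem.List.insertBy pvBefore x acc) [] := rfl
  rw [hfold]
  have h := pv_invariant target lists
  simp only at h
  obtain ⟨hn, hs⟩ := h
  have hstep : (fun (acc : List Int × Int) sublist =>
      let sublist_sum := sublist.sum
      if sublist_sum > target ∧ (sublist.length : Int) > acc.2 then (sublist, (sublist.length : Int)) else acc)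
      = pvStep target := by
    funext acc s; rfl
  rw [hstep]
  cases hr : (lists.foldl (fun acc x => PySem.List.insertBy pvBefore x acc) []).find?
      (fun s => decide (s.sum > target)) with
  | none => simp [hn hr]
  | some m =>
    rcases hs m hr with ⟨hg, _⟩ | ⟨hme, hg⟩
    · simp [hg]
    · subst hme; simp [hg]
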